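-- pv_equiv track=rewrite | github.com/VicLambert/qml-quansistor-entropy | qqe/circuit/families.py | leftover_pairs
-- ===== SOURCE A (Python) =====
-- def leftover_pairs(n_qubits: int, used: set[int], connectivity: str) -> list[tuple[int, int]]:
--     left = [i for i in range(n_qubits) if i not in used]
--     leftover = set(left)
--
--     pairs: list[tuple[int, int]] = []
--     used = set()
--
--     for i in range(n_qubits - 1):
--         a, b = i, i + 1
--         if a in leftover and b in leftover and a not in used and b not in used:
--             pairs.append((a, b))
--             used.update((a, b))
--     if connectivity in ("loop", "ring"):
--         a, b = n_qubits - 1, 0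
--         if a in leftover and b in leftover and a not in used and b not in used:
--             pairs.append((a, b))
--             used.update((a, b))
--     return pairs
-- ===== SOURCE B (Python) =====
-- def leftover_pairs(n_qubits, used, connectivity):
--     free = [i for i in range(n_qubits) if i not in used]
--     pairs = []
--     k = 0
--     while k + 1 < len(free):
--         if free[k + 1] == free[k] + 1:
--             pairs.append((free[k], free[k + 1]))
--             k += 2
--         else:
--             k += 1
--     if connectivity in ("loop", "ring") and free:
--         if free[0] == 0 and free[-1] == n_qubits - 1 \
--            and not (pairs and pairs[0] == (0, 1)) \
--            and not (pairs and pairs[-1] == (n_qubits - 2, n_qubits - 1)):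
--             pairs.append((n_qubits - 1, 0))
--     return pairs
-- ===== Notes on version B (the rewrite author's own statement) =====
-- stated objective: alternative
-- what changed: B filters the free qubits once into a sorted list and pairs them with a single two-pointer walk over that list (no leftover/used sets, no per-qubit set membership checks), deriving the ring endpoint availability from the first/last emitted pair instead of a used-set lookup.
import Mathlib
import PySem

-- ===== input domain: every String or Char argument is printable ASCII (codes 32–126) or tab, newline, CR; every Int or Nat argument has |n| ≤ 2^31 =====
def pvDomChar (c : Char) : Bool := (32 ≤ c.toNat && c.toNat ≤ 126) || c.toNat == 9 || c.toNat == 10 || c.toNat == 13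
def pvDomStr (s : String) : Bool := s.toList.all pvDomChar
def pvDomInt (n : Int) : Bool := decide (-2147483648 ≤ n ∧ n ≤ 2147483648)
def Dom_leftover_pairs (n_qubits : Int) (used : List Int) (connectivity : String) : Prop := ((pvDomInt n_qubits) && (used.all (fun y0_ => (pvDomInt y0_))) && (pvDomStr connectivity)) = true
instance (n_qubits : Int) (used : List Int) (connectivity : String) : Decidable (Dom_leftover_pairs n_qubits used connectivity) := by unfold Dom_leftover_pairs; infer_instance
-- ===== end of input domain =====

-- B re-implements the greedy adjacent pairing by a two-pointer walk over the sorted free list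
-- (no leftover/used sets), deriving the ring endpoint check from the first/last emitted pair;
-- objective: alternative decomposition, same O(n) cost.

-- ===== PORT A =====
-- loop body of A's 'for i in range(n_qubits - 1)' (kept as a named helper)
def stepA (leftover : PySem.Set Int) (st : List (Int × Int) × PySem.Set Int) (i : Int) :
    List (Int × Int) × PySem.Set Int :=
  let a := i
  let b := i + 1
  if a ∈ leftover ∧ b ∈ leftover ∧ a ∉ st.2 ∧ b ∉ st.2 then
    (st.1 ++ [(a, b)], PySem.Set.add (PySem.Set.add st.2 a) b)
  else
    st

def leftover_pairs (n_qubits : Int) (used : List Int) (connectivity : String) : List (Int × Int) :=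
  let left := (PySem.List.pyRange 0 n_qubits 1).filter (fun i => !(used.contains i))
  let leftover : PySem.Set Int := PySem.Set.ofList left
  let st := (PySem.List.pyRange 0 (n_qubits - 1) 1).foldl (stepA leftover) ([], PySem.Set.empty)
  if connectivity = "loop" ∨ connectivity = "ring" then
    let a := n_qubits - 1
    let b := (0 : Int)
    if a ∈ leftover ∧ b ∈ leftover ∧ a ∉ st.2 ∧ b ∉ st.2 then st.1 ++ [(a, b)] else st.1
  else st.1

-- ===== PORT B =====
-- B's while-loop over the free list: pair two adjacent free qubits, else advance one
def pairFree : List Int → List (Int × Int)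
  | a :: b :: rest => if b = a + 1 then (a, b) :: pairFree rest else pairFree (b :: rest)
  | _ => []

def leftover_pairs_alt (n_qubits : Int) (used : List Int) (connectivity : String) : List (Int × Int) :=
  let free := (PySem.List.pyRange 0 n_qubits 1).filter (fun i => !(used.contains i))
  let pairs := pairFree free
  if (connectivity = "loop" ∨ connectivity = "ring") ∧ free ≠ [] then
    if free.head? = some 0 ∧ free.getLast? = some (n_qubits - 1) ∧
       ¬(pairs ≠ [] ∧ pairs.head? = some (0, 1)) ∧
       ¬(pairs ≠ [] ∧ pairs.getLast? = some (n_qubits - 2, n_qubits - 1)) then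
      pairs ++ [(n_qubits - 1, 0)]
    else pairs
  else pairs

-- ===== PRECONDITION & SPEC =====
def Spec_leftover_pairs (n_qubits : Int) (used : List Int) (connectivity : String) (out : List (Int × Int)) : Prop := out = leftover_pairs_alt n_qubits used connectivity
instance (n_qubits : Int) (used : List Int) (connectivity : String) (out : List (Int × Int)) : Decidable (Spec_leftover_pairs n_qubits used connectivity out) := by unfold Spec_leftover_pairs; infer_instance

-- ===== CLAIM (what is proved, stated in full; the proofs are below) =====
def Claim_equal_leftover_pairs : Prop := ∀ (n_qubits : Int) (used : List Int) (connectivity : String), Dom_leftover_pairs n_qubits used connectivity → Spec_leftover_pairs n_qubits used connectivity (leftover_pairs n_qubits used connectivity)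

-- ===== LEMMAS AND PROOFS =====

-- A's line loop as a pure left-to-right scan: fuel = #indices still to process,
-- a = current index, lm = "a is already used (second member of the previous pair)"
def lineGreedy (p : Int → Bool) : Nat → Int → Bool → List (Int × Int)
  | 0, _, _ => []
  | f + 1, a, lm =>
    if p a && p (a + 1) && !lm then
      (a, a + 1) :: lineGreedy p f (a + 1) true
    else
      lineGreedy p f (a + 1) false

lemma foldA (S : PySem.Set Int) (p : Int → Bool) (hS : ∀ x : Int, x ∈ S ↔ p x = true) :
    ∀ (f : Nat) (a : Int) (ps : List (Int × Int)) (u : PySem.Set Int),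
      (∀ j ∈ u, j ≤ a) →
      ((PySem.List.pyRange a (a + (f : Int)) 1).foldl (stepA S) (ps, u)).1
        = ps ++ lineGreedy p f a (decide (a ∈ u)) ∧
      ∀ x : Int, x ∈ ((PySem.List.pyRange a (a + (f : Int)) 1).foldl (stepA S) (ps, u)).2 ↔
        x ∈ u ∨ ∃ q ∈ lineGreedy p f a (decide (a ∈ u)), q.1 = x ∨ q.2 = x := by
  intro f
  induction f with
  | zero =>
    intro a ps u hu
    rw [show a + ((0 : Nat) : Int) = a by simp, PySem.List.pyRange_one_eq_nil (le_refl a)]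
    simp [lineGreedy]
  | succ f ih =>
    intro a ps u hu
    have hB : a + ((f + 1 : Nat) : Int) = (a + 1) + (f : Int) := by push_cast; omega
    rw [hB, PySem.List.pyRange_one_cons (by omega)]
    simp only [List.foldl_cons]
    have hb : a + 1 ∉ u := fun h => by have := hu _ h; omega
    by_cases hc : p a = true ∧ p (a + 1) = true ∧ a ∉ u
    · have hstep : stepA S (ps, u) a = (ps ++ [(a, a + 1)], PySem.Set.add (PySem.Set.add u a) (a + 1)) := by
        simp only [stepA]
        rw [if_pos ⟨(hS a).mpr hc.1, (hS _).mpr hc.2.1, hc.2.2, hb⟩]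
      rw [hstep]
      have hu' : ∀ j ∈ PySem.Set.add (PySem.Set.add u a) (a + 1), j ≤ a + 1 := by
        intro j hj
        rcases (PySem.Set.mem_add _ _ _).mp hj with hj | hj
        · rcases (PySem.Set.mem_add _ _ _).mp hj with hj | hj
          · have := hu _ hj; omega
          · omega
        · omega
      obtain ⟨ih1, ih2⟩ := ih (a + 1) (ps ++ [(a, a + 1)]) _ hu'
      have hd : decide ((a + 1) ∈ PySem.Set.add (PySem.Set.add u a) (a + 1)) = true := by
        simp [PySem.Set.mem_add]
      have hg : lineGreedy p (f + 1) a (decide (a ∈ u)) = (a, a + 1) :: lineGreedy p f (a + 1) true := by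
        rw [lineGreedy, if_pos (by simp [hc.1, hc.2.1, hc.2.2])]
      rw [hd] at ih1 ih2
      constructor
      · rw [ih1, hg]; simp
      · intro x
        rw [ih2 x, hg]
        simp only [PySem.Set.mem_add, List.mem_cons]
        constructor
        · rintro (((h | h) | h) | ⟨q, hq, he⟩)
          · exact Or.inl h
          · exact Or.inr ⟨(a, a + 1), Or.inl rfl, Or.inl (by simp [h])⟩
          · exact Or.inr ⟨(a, a + 1), Or.inl rfl, Or.inr (by simp [h])⟩
          · exact Or.inr ⟨q, Or.inr hq, he⟩
        · rintro (h | ⟨q, (rfl | hq), he⟩)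
          · exact Or.inl (Or.inl (Or.inl h))
          · rcases he with he | he
            · exact Or.inl (Or.inl (Or.inr he.symm))
            · exact Or.inl (Or.inr he.symm)
          · exact Or.inr ⟨q, hq, he⟩
    · have hstep : stepA S (ps, u) a = (ps, u) := by
        simp only [stepA]
        rw [if_neg]
        rintro ⟨ha, ha1, hau, _⟩
        exact hc ⟨(hS a).mp ha, (hS _).mp ha1, hau⟩
      rw [hstep]
      have hu' : ∀ j ∈ u, j ≤ a + 1 := fun j hj => by have := hu _ hj; omega
      obtain ⟨ih1, ih2⟩ := ih (a + 1) ps u hu'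
      have hd : decide ((a + 1) ∈ u) = false := by simp [hb]
      have hg : lineGreedy p (f + 1) a (decide (a ∈ u)) = lineGreedy p f (a + 1) false := by
        rw [lineGreedy, if_neg]
        intro hcond
        simp only [Bool.and_eq_true, Bool.not_eq_true', decide_eq_false_iff_not] at hcond
        exact hc ⟨hcond.1.1, hcond.1.2, hcond.2⟩
      rw [hd] at ih1 ih2
      exact ⟨by rw [ih1, hg], fun x => by rw [ih2 x, hg]⟩

lemma pairFree_cons_of_ne {a : Int} {l : List Int} (h : ∀ x ∈ l, x ≠ a + 1) :
    pairFree (a :: l) = pairFree l := by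
  cases l with
  | nil => simp [pairFree]
  | cons c t =>
    simp only [pairFree]
    rw [if_neg (h c (by simp))]

lemma lineGreedy_eq_pairFree (p : Int → Bool) :
    ∀ (f : Nat) (a : Int),
      lineGreedy p f a false = pairFree ((PySem.List.pyRange a (a + (f : Int) + 1) 1).filter p) := by
  intro f
  induction f using Nat.strong_induction_on with
  | _ f ih =>
    intro a
    match f with
    | 0 =>
      rw [show a + ((0 : Nat) : Int) + 1 = a + 1 by simp, PySem.List.pyRange_one_singleton]
      by_cases hpa : p a = true
      · simp [lineGreedy, hpa, pairFree]
      · simp [lineGreedy, hpa, pairFree]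
    | (s + 1) =>
      have hB : a + ((s + 1 : Nat) : Int) + 1 = (a + 1) + (s : Int) + 1 := by push_cast; omega
      rw [hB, PySem.List.pyRange_one_cons (by omega)]
      by_cases hpa : p a = true
      · by_cases hpa1 : p (a + 1) = true
        · rw [lineGreedy, if_pos (by simp [hpa, hpa1])]
          match s with
          | 0 =>
            rw [show (a + 1) + ((0 : Nat) : Int) + 1 = (a + 1) + 1 by simp,
              PySem.List.pyRange_one_singleton]
            simp only [List.filter_cons, hpa, hpa1, if_pos]
            simp [lineGreedy, pairFree]
          | (t + 1) =>
            have hB2 : (a + 1) + ((t + 1 : Nat) : Int) + 1 = (a + 2) + (t : Int) + 1 := by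
              push_cast; omega
            rw [hB2, PySem.List.pyRange_one_cons (by omega)]
            simp only [List.filter_cons, hpa, hpa1, if_pos]
            have hg2 : lineGreedy p (t + 1) (a + 1) true = lineGreedy p t (a + 1 + 1) false := by
              rw [lineGreedy, if_neg (by simp)]
            rw [hg2, show a + 1 + 1 = a + 2 by ring, ih t (by omega) (a + 2)]
            simp [pairFree]
        · rw [lineGreedy, if_neg (by simp [hpa1]), ih s (by omega) (a + 1)]
          simp only [List.filter_cons, hpa, if_pos]
          rw [pairFree_cons_of_ne]
          intro x hx
          rcases List.mem_filter.mp hx with ⟨_, hpx⟩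
          intro hxa; rw [hxa] at hpx; exact hpa1 hpx
      · rw [lineGreedy, if_neg (by simp [hpa]), ih s (by omega) (a + 1)]
        simp only [List.filter_cons]
        rw [if_neg (by simp [hpa])]

lemma pairFree_mem {l : List Int} {q : Int × Int} (hq : q ∈ pairFree l) :
    q.1 ∈ l ∧ q.2 ∈ l ∧ q.2 = q.1 + 1 := by
  induction l using pairFree.induct with
  | case1 a rest ih =>
    simp only [pairFree, ] at hq
    rcases List.mem_cons.mp hq with h' | h'
    · subst h'; simp
    · have := ih h'
      refine ⟨?_, ?_, this.2.2⟩ <;> simp [this.1, this.2.1]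
  | case2 a b rest h ih =>
    rw [pairFree, if_neg h] at hq
    have := ih hq
    rcases this with ⟨h1, h2, h3⟩
    exact ⟨by simp [List.mem_cons.mp h1], by simp [List.mem_cons.mp h2], h3⟩
  | case3 l h => cases l with
    | nil => simp [pairFree] at hq
    | cons x xs => cases xs with
      | nil => simp [pairFree] at hq
      | cons y ys => exact absurd rfl (h x y ys)

lemma pairFree_pairwise {l : List Int} (hl : l.Pairwise (· < ·)) :
    (pairFree l).Pairwise (fun q r => q.2 < r.1) := by
  induction l using pairFree.induct with
  | case1 a rest ih =>
    simp only [pairFree]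
    refine List.pairwise_cons.mpr ⟨?_, ih (hl.sublist (by simp))⟩
    intro r hr
    have h1 : r.1 ∈ rest := (pairFree_mem hr).1
    exact (List.pairwise_cons.mp (List.pairwise_cons.mp hl).2).1 r.1 h1
  | case2 a b rest h ih =>
    rw [pairFree, if_neg h]
    exact ih (List.pairwise_cons.mp hl).2
  | case3 l h => cases l with
    | nil => simp [pairFree]
    | cons x xs => cases xs with
      | nil => simp [pairFree]
      | cons y ys => exact absurd rfl (h x y ys)

lemma pairwise_getLast? {α : Type} {R : α → α → Prop} :
    ∀ {l : List α}, l.Pairwise R → ∀ {a b : α}, a ∈ l → l.getLast? = some b → a = b ∨ R a b := by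
  intro l hl
  induction l with
  | nil => intro a b ha; simp at ha
  | cons x xs ih =>
    intro a b ha hb
    cases xs with
    | nil =>
      simp at ha hb; subst ha; subst hb; exact Or.inl rfl
    | cons y ys =>
      rw [List.getLast?_cons_cons] at hb
      rcases List.mem_cons.mp ha with h | h
      · subst h
        exact Or.inr ((List.pairwise_cons.mp hl).1 b (List.mem_of_getLast? hb))
      · exact ih (List.pairwise_cons.mp hl).2 h hb

lemma sorted_head_zero {l : List Int} (hl : l.Pairwise (· < ·)) (h0 : ∀ x ∈ l, 0 ≤ x) :
    0 ∈ l ↔ l.head? = some 0 := by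
  constructor
  · intro h
    cases l with
    | nil => simp at h
    | cons x xs =>
      rcases List.mem_cons.mp h with h | h
      · simp [← h]
      · have hx0 : 0 ≤ x := h0 x (by simp)
        have := (List.pairwise_cons.mp hl).1 0 h
        omega
  · intro h; exact List.mem_of_head? h

lemma sorted_last_max {n : Int} {l : List Int} (hl : l.Pairwise (· < ·)) (hn : ∀ x ∈ l, x < n) :
    n - 1 ∈ l ↔ l.getLast? = some (n - 1) := by
  constructor
  · intro h
    have hne : l ≠ [] := by rintro rfl; simp at h
    have hb : l.getLast? = some (l.getLast hne) := List.getLast?_eq_getLast_of_ne_nil hne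
    set b := l.getLast hne with hbdef
    rcases pairwise_getLast? hl h hb with heq | hlt
    · rw [hb, heq]
    · have := hn b (List.mem_of_getLast? hb); omega
  · intro h; exact List.mem_of_getLast? h

lemma pairFree_end_zero {l : List Int} (hl : l.Pairwise (· < ·)) (h0 : ∀ x ∈ l, 0 ≤ x) :
    (∃ q ∈ pairFree l, q.1 = 0 ∨ q.2 = 0) ↔
      (pairFree l ≠ [] ∧ (pairFree l).head? = some (0, 1)) := by
  constructor
  · rintro ⟨q, hq, hq0⟩
    obtain ⟨h1, h2, h3⟩ := pairFree_mem hq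
    have hq1 : q.1 = 0 := by
      rcases hq0 with h | h
      · exact h
      · exfalso; have := h0 q.1 h1; omega
    have hqq : q = (0, 1) := by obtain ⟨x, y⟩ := q; simp_all
    rw [hqq] at h1 h2; simp at h1 h2
    have hh : l.head? = some 0 := (sorted_head_zero hl h0).mp h1
    cases l with
    | nil => simp at hh
    | cons x t =>
      simp at hh
      subst hh
      have h1t : (1 : Int) ∈ t := by
        rcases List.mem_cons.mp h2 with h | h
        · omega
        · exact h
      cases t with
      | nil => simp at h1t
      | cons c t' =>
        have hc0 : (0 : Int) < c := (List.pairwise_cons.mp hl).1 c (by simp)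
        have hc1 : c = 1 := by
          rcases List.mem_cons.mp h1t with h | h
          · omega
          · have := (List.pairwise_cons.mp (List.pairwise_cons.mp hl).2).1 1 h
            omega
        subst hc1
        refine ⟨by simp [pairFree], by simp [pairFree]⟩
  · rintro ⟨hne, hh⟩
    exact ⟨(0, 1), List.mem_of_head? hh, Or.inl rfl⟩

lemma pairFree_end_last {n : Int} {l : List Int} (hl : l.Pairwise (· < ·)) (hn : ∀ x ∈ l, x < n) :
    (∃ q ∈ pairFree l, q.1 = n - 1 ∨ q.2 = n - 1) ↔
      (pairFree l ≠ [] ∧ (pairFree l).getLast? = some (n - 2, n - 1)) := by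
  constructor
  · rintro ⟨q, hq, hq0⟩
    obtain ⟨h1, h2, h3⟩ := pairFree_mem hq
    have hq2 : q.2 = n - 1 := by
      rcases hq0 with h | h
      · exfalso; have := hn q.2 h2; omega
      · exact h
    have hqq : q = (n - 2, n - 1) := by obtain ⟨x, y⟩ := q; simp_all; omega
    have hne : pairFree l ≠ [] := by intro h; rw [h] at hq; simp at hq
    refine ⟨hne, ?_⟩
    have hb : (pairFree l).getLast? = some ((pairFree l).getLast hne) :=
      List.getLast?_eq_getLast_of_ne_nil hne
    rcases pairwise_getLast? (pairFree_pairwise hl) hq hb with heq | hlt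
    · rw [hb, ← heq, hqq]
    · exfalso
      have hr : (pairFree l).getLast hne ∈ pairFree l := List.mem_of_getLast? hb
      have := hn ((pairFree l).getLast hne).1 (pairFree_mem hr).1
      omega
  · rintro ⟨hne, hh⟩
    exact ⟨(n - 2, n - 1), List.mem_of_getLast? hh, Or.inr rfl⟩

set_option maxHeartbeats 1000000 in
lemma leftover_pairs_eq (n : Int) (used : List Int) (conn : String) :
    leftover_pairs n used conn = leftover_pairs_alt n used conn := by
  unfold leftover_pairs leftover_pairs_alt
  dsimp only
  by_cases hn : n ≤ 0
  · rw [PySem.List.pyRange_one_eq_nil hn, PySem.List.pyRange_one_eq_nil (by omega : n - 1 ≤ 0)]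
    simp [pairFree, PySem.Set.empty]
  · rw [not_le] at hn
    set F := (PySem.List.pyRange 0 n 1).filter (fun i => !(used.contains i)) with hF
    have hsorted : F.Pairwise (· < ·) := (PySem.List.pairwise_lt_pyRange_one 0 n).filter _
    have hmem : ∀ x ∈ F, 0 ≤ x ∧ x < n := by
      intro x hx
      have hx2 := (List.mem_filter.mp hx).1
      rw [PySem.List.mem_pyRange_one] at hx2
      exact hx2
    set p : Int → Bool := fun i => decide (i ∈ F) with hp
    have hfilter : (PySem.List.pyRange 0 n 1).filter p = F := by
      rw [hF]
      apply List.filter_congr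
      intro x hx
      rw [PySem.List.mem_pyRange_one] at hx
      simp [hp, hF, List.mem_filter, PySem.List.mem_pyRange_one, hx]
    have hS : ∀ x : Int, x ∈ PySem.Set.ofList F ↔ p x = true := by
      intro x
      rw [PySem.Set.mem_ofList F x]
      simp [hp]
    have htn : (((n - 1).toNat : Nat) : Int) = n - 1 := Int.toNat_of_nonneg (by omega)
    obtain ⟨hA1, hA2⟩ := foldA (PySem.Set.ofList F) p hS (n - 1).toNat 0 [] PySem.Set.empty
      (by intro j hj; simp [PySem.Set.empty] at hj)
    rw [show (0 : Int) + (((n - 1).toNat : Nat) : Int) = n - 1 by omega] at hA1 hA2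
    rw [show decide ((0 : Int) ∈ (PySem.Set.empty : PySem.Set Int)) = false by
      simp [PySem.Set.empty]] at hA1 hA2
    have hline : lineGreedy p (n - 1).toNat 0 false = pairFree F := by
      rw [lineGreedy_eq_pairFree p (n - 1).toNat 0,
        show (0 : Int) + (((n - 1).toNat : Nat) : Int) + 1 = n by omega, hfilter]
    rw [hline] at hA1 hA2
    simp only [List.nil_append] at hA1
    rw [hA1]
    by_cases hconn : conn = "loop" ∨ conn = "ring"
    · by_cases hFnil : F = []
      · have hpf : pairFree F = [] := by rw [hFnil]; rfl
        have h0 : ¬ ((0 : Int) ∈ PySem.Set.ofList F) := by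
          rw [PySem.Set.mem_ofList F 0, hFnil]; simp
        rw [if_pos hconn, if_neg (by rintro ⟨_, h, _⟩; exact h0 h),
          if_neg (by rintro ⟨_, h⟩; exact h hFnil)]
      · have h0mem : ∀ x ∈ F, 0 ≤ x := fun x hx => (hmem x hx).1
        have hnmem : ∀ x ∈ F, x < n := fun x hx => (hmem x hx).2
        have e1 : ((n - 1) ∈ PySem.Set.ofList F) ↔ F.getLast? = some (n - 1) := by
          rw [PySem.Set.mem_ofList F (n - 1)]
          exact sorted_last_max hsorted hnmem
        have e2 : ((0 : Int) ∈ PySem.Set.ofList F) ↔ F.head? = some 0 := by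
          rw [PySem.Set.mem_ofList F 0]
          exact sorted_head_zero hsorted h0mem
        have e3 := pairFree_end_zero hsorted h0mem
        have e4 := pairFree_end_last hsorted hnmem
        have hiff : ((n - 1) ∈ PySem.Set.ofList F ∧ (0 : Int) ∈ PySem.Set.ofList F ∧
              ¬ (n - 1) ∈ ((PySem.List.pyRange 0 (n - 1) 1).foldl (stepA (PySem.Set.ofList F))
                  ([], PySem.Set.empty)).2 ∧
              ¬ (0 : Int) ∈ ((PySem.List.pyRange 0 (n - 1) 1).foldl (stepA (PySem.Set.ofList F))
                  ([], PySem.Set.empty)).2) ↔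
            (F.head? = some 0 ∧ F.getLast? = some (n - 1) ∧
              ¬ (pairFree F ≠ [] ∧ (pairFree F).head? = some (0, 1)) ∧
              ¬ (pairFree F ≠ [] ∧ (pairFree F).getLast? = some (n - 2, n - 1))) := by
          rw [hA2 (n - 1), hA2 0]
          simp only [PySem.Set.empty, List.not_mem_nil, false_or]
          rw [e1, e2, e3, e4]
          tauto
        rw [if_pos hconn,
          if_pos (show (conn = "loop" ∨ conn = "ring") ∧ F ≠ [] from ⟨hconn, hFnil⟩),
          if_congr hiff rfl rfl]
    · rw [if_neg hconn, if_neg (by rintro ⟨h, _⟩; exact hconn h)]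

-- ===== VERDICT (by name: the statement is the Claim_ definition above) =====
theorem leftover_pairs_spec : Claim_equal_leftover_pairs := by
  intro n used conn _
  exact leftover_pairs_eq n used conn
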